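-- pv_equiv track=rewrite | github.com/Joeavaib/Skripts | packages/policy/gate.py | _has_why_1s
-- ===== SOURCE A (Python) =====
-- from typing import Any, Mapping
--
-- def _has_why_1s(payload: Mapping[str, Any]) -> bool:
--     why_1s = payload.get("why_1s")
--     if not isinstance(why_1s, str):
--         return False
--
--     text = why_1s.strip()
--     if not text:
--         return False
--
--     # Enforce one short sentence.
--     sentence_terminators = sum(text.count(x) for x in (".", "!", "?"))
--     if sentence_terminators > 1:
--         return False
--
--     if "\n" in text:
--         return False
--
--     return True
-- ===== SOURCE B (Python) =====
-- def _has_why_1s(payload):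
--     why_1s = payload.get("why_1s")
--     if not isinstance(why_1s, str):
--         return False
--
--     text = why_1s.strip()
--     if not text:
--         return False
--
--     # Single pass: count sentence terminators and reject newlines as we go.
--     terminators = 0
--     for ch in text:
--         if ch == "\n":
--             return False
--         if ch in ".!?":
--             terminators += 1
--             if terminators > 1:
--                 return False
--     return True
-- ===== Notes on version B (the rewrite author's own statement) =====
-- stated objective: simpler
-- what changed: Replaced the three separate count() scans plus the newline membership scan with a single character loop that tallies terminators and rejects newlines, with early exit as soon as the sentence is proved invalid.
import Mathlib
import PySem

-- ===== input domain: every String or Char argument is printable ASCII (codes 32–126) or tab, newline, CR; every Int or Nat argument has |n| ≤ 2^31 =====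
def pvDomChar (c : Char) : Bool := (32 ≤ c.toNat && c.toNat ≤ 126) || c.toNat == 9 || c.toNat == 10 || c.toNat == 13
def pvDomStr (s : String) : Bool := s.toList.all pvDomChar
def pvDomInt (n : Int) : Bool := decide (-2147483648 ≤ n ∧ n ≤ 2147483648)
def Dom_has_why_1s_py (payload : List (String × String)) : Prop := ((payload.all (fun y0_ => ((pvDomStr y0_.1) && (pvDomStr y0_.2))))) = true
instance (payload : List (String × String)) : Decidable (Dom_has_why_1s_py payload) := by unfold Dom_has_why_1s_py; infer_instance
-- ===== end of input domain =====

-- B replaces A's three count() scans and newline membership test with one early-exit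
-- character loop; objective: simpler (one pass instead of four scans).

-- ===== PORT A =====
-- payload values are strings under the type convention, so the isinstance guard
-- reduces to the key being present.
def has_why_1s_py (payload : List (String × String)) : Bool :=
  match (PySem.Dict.mk payload).get? "why_1s" with
  | none => false
  | some why_1s =>
    let text := PySem.Str.strip why_1s
    if text = "" then false
    else
      let sentence_terminators :=
        ([".", "!", "?"].map (fun x => PySem.Str.count text x)).sum
      if sentence_terminators > 1 then false
      else if PySem.Str.isIn "\n" text then false
      else true

-- ===== PORT B =====
-- the 'for ch in text' loop of Source B
def hasWhyLoop : List Char → Nat → Bool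
  | [], _ => true
  | ch :: rest, terminators =>
    if ch = '\n' then false
    else if ch = '.' ∨ ch = '!' ∨ ch = '?' then
      if terminators + 1 > 1 then false
      else hasWhyLoop rest (terminators + 1)
    else hasWhyLoop rest terminators

def has_why_1s_py_alt (payload : List (String × String)) : Bool :=
  match (PySem.Dict.mk payload).get? "why_1s" with
  | none => false
  | some why_1s =>
    let text := PySem.Str.strip why_1s
    if text = "" then false
    else hasWhyLoop text.toList 0

-- ===== PRECONDITION & SPEC =====
def Spec_has_why_1s_py (payload : List (String × String)) (out : Bool) : Prop := out = has_why_1s_py_alt payload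
instance (payload : List (String × String)) (out : Bool) : Decidable (Spec_has_why_1s_py payload out) := by unfold Spec_has_why_1s_py; infer_instance

-- ===== CLAIM (what is proved, stated in full; the proofs are below) =====
def Claim_equal_has_why_1s_py : Prop := ∀ (payload : List (String × String)), Dom_has_why_1s_py payload → Spec_has_why_1s_py payload (has_why_1s_py payload)

-- ===== LEMMAS AND PROOFS =====

-- the terminator test as a Bool predicate
def termB (c : Char) : Bool := c == '.' || c == '!' || c == '?'

-- a single-character pattern is counted like List.count
lemma chars_count_go_singleton (c : Char) :
    ∀ (l : List Char) (fuel acc : Nat), l.length ≤ fuel →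
      PySem.Chars.count.go [c] fuel l acc = acc + l.count c := by
  intro l
  induction l with
  | nil => intro fuel acc _; cases fuel <;> simp [PySem.Chars.count.go]
  | cons h t ih =>
    intro fuel acc hf
    cases fuel with
    | zero => simp at hf
    | succ n =>
      simp only [List.length_cons, Nat.succ_le_succ_iff] at hf
      by_cases hc : h = c
      · subst hc
        rw [PySem.Chars.count.go]
        simp only [List.isPrefixOf, BEq.rfl, Bool.true_and, List.isPrefixOf_nil_left,
          if_true, List.length_cons, List.length_nil]
        simp [List.drop_one, ih n (acc + 1) hf, List.count_cons]
        omega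
      · have hp : ([c].isPrefixOf (h :: t)) = false := by
          simp [List.isPrefixOf]; exact fun h' => (hc h'.symm).elim
        rw [PySem.Chars.count.go]
        simp [hp, ih n acc hf, List.count_cons, hc]

lemma chars_count_singleton (l : List Char) (c : Char) :
    PySem.Chars.count l [c] = l.count c := by
  simp [PySem.Chars.count, chars_count_go_singleton c l l.length 0 (le_refl _)]

lemma isIn_singleton_iff (c : Char) (l : List Char) :
    PySem.Chars.isIn [c] l = true ↔ c ∈ l := by
  rw [PySem.Chars.isIn_iff_infix]
  constructor
  · rintro ⟨s, t, rfl⟩; simp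
  · intro h
    obtain ⟨s, t, rfl⟩ := List.append_of_mem h
    exact ⟨s, t, by simp⟩

lemma count_disjoint_sum (l : List Char) :
    l.count '.' + l.count '!' + l.count '?' = l.countP termB := by
  induction l with
  | nil => simp
  | cons h t ih =>
    by_cases h1 : h = '.' <;> by_cases h2 : h = '!' <;> by_cases h3 : h = '?' <;>
      simp_all [List.count_cons, List.countP_cons, termB] <;> omega

-- loop invariant: with terminator tally k ≤ 1, the loop decides "at most one
-- terminator in total and no newline"
lemma hasWhyLoop_eq :
    ∀ (l : List Char) (k : Nat), k ≤ 1 →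
      hasWhyLoop l k = (decide (k + l.countP termB ≤ 1) && !l.contains '\n') := by
  intro l
  induction l with
  | nil => intro k hk; simp [hasWhyLoop, hk]
  | cons ch rest ih =>
    intro k hk
    rw [hasWhyLoop]
    by_cases hn : ch = '\n'
    · subst hn; simp
    · rw [if_neg hn]
      have hnb : ('\n' == ch) = false := by
        simp only [beq_eq_false_iff_ne, ne_eq]
        exact fun h' => hn h'.symm
      by_cases ht : ch = '.' ∨ ch = '!' ∨ ch = '?'
      · have hp : termB ch = true := by
          rcases ht with h | h | h <;> simp [termB, h]
        rw [if_pos ht]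
        by_cases hgt : k + 1 > 1
        · rw [if_pos hgt]
          simp only [List.countP_cons, hp, if_true]
          rw [decide_eq_false (by omega : ¬ (k + (rest.countP termB + 1) ≤ 1))]
          simp
        · have hk0 : k = 0 := by omega
          subst hk0
          rw [if_neg hgt, ih 1 (by omega)]
          simp only [List.countP_cons, hp, if_true, List.contains_cons, hnb, Bool.false_or]
          congr 1
          simp only [decide_eq_decide]
          omega
      · have hp : termB ch = false := by
          simp only [termB, Bool.or_eq_false_iff, beq_eq_false_iff_ne, ne_eq]
          exact ⟨⟨fun h => ht (Or.inl h), fun h => ht (Or.inr (Or.inl h))⟩,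
            fun h => ht (Or.inr (Or.inr h))⟩
        rw [if_neg ht, ih k hk]
        simp only [List.countP_cons, hp, List.contains_cons, hnb, Bool.false_or]
        simp

-- A's branch chain on the stripped text equals B's loop
lemma text_level (l : List Char) :
    (if l.count '.' + (l.count '!' + (l.count '?' + 0)) > 1 then false
     else if l.contains '\n' then false else true) = hasWhyLoop l 0 := by
  rw [hasWhyLoop_eq l 0 (by omega)]
  have hs := count_disjoint_sum l
  by_cases hgt : l.count '.' + (l.count '!' + (l.count '?' + 0)) > 1
  · rw [if_pos hgt, decide_eq_false (by omega : ¬ (0 + l.countP termB ≤ 1))]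
    simp
  · rw [if_neg hgt, decide_eq_true (by omega : 0 + l.countP termB ≤ 1)]
    by_cases hc : l.contains '\n' = true <;> simp [hc]

-- isIn for the one-character needle "\n" is list membership
lemma str_isIn_newline (s : String) :
    PySem.Str.isIn "\n" s = s.toList.contains '\n' := by
  rw [PySem.Str.isIn_eq]
  show PySem.Chars.isIn ['\n'] s.toList = s.toList.contains '\n'
  cases hb : PySem.Chars.isIn ['\n'] s.toList with
  | true =>
    symm
    simp only [List.contains_eq_mem, decide_eq_true_eq]
    exact (isIn_singleton_iff _ _).mp hb
  | false =>
    symm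
    simp only [List.contains_eq_mem, decide_eq_false_iff_not]
    intro hm
    rw [(isIn_singleton_iff _ _).mpr hm] at hb
    simp at hb

-- ===== VERDICT (by name: the statement is the Claim_ definition above) =====
theorem has_why_1s_py_spec : Claim_equal_has_why_1s_py := by
  intro payload _
  unfold Spec_has_why_1s_py has_why_1s_py has_why_1s_py_alt
  cases h : (PySem.Dict.mk payload).get? "why_1s" with
  | none => rfl
  | some why =>
    simp only
    by_cases he : PySem.Str.strip why = ""
    · simp [he]
    · rw [if_neg he, if_neg he]
      rw [← text_level (PySem.Str.strip why).toList]
      have hcnt : ∀ (x : String) (c : Char), x.toList = [c] →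
          PySem.Str.count (PySem.Str.strip why) x = (PySem.Str.strip why).toList.count c := by
        intro x c hx
        rw [PySem.Str.count_eq, hx, chars_count_singleton]
      rw [List.map_cons, List.map_cons, List.map_cons, List.map_nil,
          List.sum_cons, List.sum_cons, List.sum_cons, List.sum_nil]
      rw [hcnt "." '.' rfl, hcnt "!" '!' rfl, hcnt "?" '?' rfl]
      rw [str_isIn_newline]
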